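-- pv_equiv track=rewrite | github.com/koreakk/Online-Judge | boj/Bronze II/8958. OX퀴즈/Python.py | solution
-- ===== SOURCE A (Python) =====
-- def solution(data: str) -> int:
--     answer = 0
--     curr = 0
--
--     for c in data:
--         if c == 'X':
--             curr = 0
--             continue
--
--         curr += 1
--         answer += curr
--
--     return answer
-- ===== SOURCE B (Python) =====
-- def solution(data: str) -> int:
--     # group the string into maximal runs of non-'X' characters and
--     # add the triangular number of each run length
--     return sum(n * (n + 1) // 2 for n in map(len, data.split('X')))
-- ===== Notes on version B (the rewrite author's own statement) =====
-- stated objective: simpler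
-- what changed: Replaces the per-character running-streak accumulation with split('X') into runs plus the closed-form triangular number n*(n+1)//2 per run.
import Mathlib
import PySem

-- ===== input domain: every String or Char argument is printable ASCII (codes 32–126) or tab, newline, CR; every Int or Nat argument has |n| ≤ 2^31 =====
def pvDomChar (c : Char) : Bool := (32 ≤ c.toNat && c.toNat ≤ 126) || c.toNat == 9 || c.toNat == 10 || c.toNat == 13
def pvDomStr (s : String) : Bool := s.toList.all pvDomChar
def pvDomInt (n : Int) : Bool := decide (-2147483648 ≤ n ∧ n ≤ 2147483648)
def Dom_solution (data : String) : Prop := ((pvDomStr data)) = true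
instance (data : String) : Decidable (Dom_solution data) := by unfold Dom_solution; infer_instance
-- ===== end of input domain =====

-- B replaces A's per-character running streak counter with split('X') into runs
-- and a closed-form triangular number per run (objective: simpler).

-- ===== PORT A =====
-- literal transliteration: a fold carrying (answer, curr); 'X' resets curr,
-- any other character does curr += 1; answer += curr.
def solution (data : String) : Int :=
  (data.toList.foldl
    (fun (p : Int × Int) c =>
      if c = 'X' then (p.1, 0) else (p.1 + (p.2 + 1), p.2 + 1))
    (0, 0)).1

-- ===== PORT B =====
-- sum(n*(n+1)//2 for n in map(len, data.split('X'))); run lengths are ≥ 0,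
-- so Python's // 2 is exactly Nat division here.
def solution_alt (data : String) : Int :=
  match PySem.Str.split? data "X" with
  | some parts =>
      (parts.map (fun (p : String) => (((p.toList.length * (p.toList.length + 1)) / 2 : Nat) : Int))).sum
  | none => 0   -- unreachable: the separator "X" is nonempty

-- ===== PRECONDITION & SPEC =====
def Spec_solution (data : String) (out : Int) : Prop := out = solution_alt data
instance (data : String) (out : Int) : Decidable (Spec_solution data out) := by unfold Spec_solution; infer_instance

-- ===== CLAIM (what is proved, stated in full; the proofs are below) =====
def Claim_equal_solution : Prop := ∀ (data : String), Dom_solution data → Spec_solution data (solution data)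

-- ===== LEMMAS AND PROOFS =====

-- run decomposition: maximal runs of non-'X' characters (always nonempty, like str.split)
def pvSegs : List Char → List (List Char)
  | [] => [[]]
  | c :: rest => if c = 'X' then [] :: pvSegs rest else (pvSegs rest).modifyHead (c :: ·)

theorem pvSegs_ne_nil (l : List Char) : pvSegs l ≠ [] := by
  cases l with
  | nil => simp [pvSegs]
  | cons c rest =>
    simp only [pvSegs]
    split_ifs
    · simp
    · cases h : pvSegs rest with
      | nil => exact absurd h (pvSegs_ne_nil rest)
      | cons s ss => simp [List.modifyHead]

-- triangular number
def pvT (n : Nat) : Int := ((n * (n + 1)) / 2 : Nat)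

theorem pvT_succ (n : Nat) : pvT (n + 1) = pvT n + (n + 1) := by
  unfold pvT
  have h : (n + 1) * (n + 1 + 1) = n * (n + 1) + (n + 1) * 2 := by ring
  rw [h, Nat.add_mul_div_right _ _ (by norm_num : 0 < 2)]
  push_cast
  ring

-- A's remaining score contribution given the current streak c
def pvSumA : List Char → Nat → Int
  | [], _ => 0
  | x :: l, c => if x = 'X' then pvSumA l 0 else ((c : Int) + 1) + pvSumA l (c + 1)

theorem pvFoldA (l : List Char) (a : Int) (c : Nat) :
    (l.foldl
      (fun (p : Int × Int) ch =>
        if ch = 'X' then (p.1, 0) else (p.1 + (p.2 + 1), p.2 + 1))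
      (a, (c : Int))).1 = a + pvSumA l c := by
  induction l generalizing a c with
  | nil => simp [pvSumA]
  | cons x l ih =>
    simp only [List.foldl, pvSumA]
    split_ifs with h
    · simpa using ih a 0
    · have h1 := ih (a + ((c : Int) + 1)) (c + 1)
      push_cast at h1
      rw [h1]; ring

-- B's remaining score: first run extends the current streak c, rest are fresh
def pvSumB : List (List Char) → Nat → Int
  | [], _ => 0
  | s :: rest, c => (pvT (c + s.length) - pvT c) + (rest.map (fun t => pvT t.length)).sum

theorem pvSumB_zero (ss : List (List Char)) :
    pvSumB ss 0 = (ss.map (fun t => pvT t.length)).sum := by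
  cases ss with
  | nil => simp [pvSumB]
  | cons s rest => simp [pvSumB, pvT]

theorem pvSumA_eq (l : List Char) (c : Nat) : pvSumA l c = pvSumB (pvSegs l) c := by
  induction l generalizing c with
  | nil => simp [pvSumA, pvSegs, pvSumB]
  | cons x l ih =>
    simp only [pvSumA, pvSegs]
    split_ifs with h
    · rw [ih, pvSumB_zero]
      simp [pvSumB]
    · rw [ih]
      cases hs : pvSegs l with
      | nil => exact absurd hs (pvSegs_ne_nil l)
      | cons s rest =>
        simp only [List.modifyHead, pvSumB, List.length_cons]
        have : pvT (c + (s.length + 1)) = pvT ((c + 1) + s.length) := by ring_nf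
        rw [show c + (s.length + 1) = (c + 1) + s.length by ring, pvT_succ c]
        ring

-- splitOn.go with the single-character separator ['X'] computes pvSegs
theorem pvGo (l : List Char) (fuel : Nat) (cur : List Char) (acc : List (List Char))
    (hf : l.length ≤ fuel) :
    PySem.Chars.splitOn.go ['X'] fuel l cur acc
      = acc.reverse ++ (pvSegs l).modifyHead (cur.reverse ++ ·) := by
  induction l generalizing fuel cur acc with
  | nil =>
    cases fuel with
    | zero => simp [PySem.Chars.splitOn.go, pvSegs]
    | succ f => simp [PySem.Chars.splitOn.go, pvSegs]
  | cons x l ih =>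
    cases fuel with
    | zero => simp at hf
    | succ f =>
      have hf' : l.length ≤ f := by simpa using hf
      simp only [PySem.Chars.splitOn.go, pvSegs]
      by_cases h : x = 'X'
      · subst h
        rw [if_pos (by simp [List.isPrefixOf]),
          show List.drop (['X'].length) ('X' :: l) = l from rfl, ih _ _ _ hf']
        simp only [List.reverse_cons, List.reverse_nil, List.nil_append, List.modifyHead,
          List.append_assoc]
        cases pvSegs l <;> simp
      · rw [if_neg (by simp [List.isPrefixOf, Ne.symm h]), ih _ _ _ hf']
        cases hs : pvSegs l with
        | nil => exact absurd hs (pvSegs_ne_nil l)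
        | cons s rest => simp [List.modifyHead, if_neg h]

theorem pvSplit (l : List Char) :
    PySem.Chars.splitOn l ['X'] = pvSegs l := by
  unfold PySem.Chars.splitOn
  rw [pvGo l (l.length + 1) [] [] (by omega)]
  cases hs : pvSegs l with
  | nil => exact absurd hs (pvSegs_ne_nil l)
  | cons s rest => simp [List.modifyHead]

-- ===== VERDICT (by name: the statement is the Claim_ definition above) =====
theorem solution_spec : Claim_equal_solution := by
  intro data _
  show solution data = solution_alt data
  unfold solution solution_alt
  have h := PySem.Str.split?_map data "X"
  have hx : ("X" : String).toList = ['X'] := by decide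
  rw [hx] at h
  have hs : PySem.Chars.split? data.toList ['X'] = some (pvSegs data.toList) := by
    simp [PySem.Chars.split?, pvSplit]
  rw [hs] at h
  cases hp : PySem.Str.split? data "X" with
  | none => rw [hp] at h; simp at h
  | some parts =>
    rw [hp] at h
    simp only [Option.map_some, Option.some.injEq] at h
    have hA := pvFoldA data.toList 0 0
    simp only [Nat.cast_zero] at hA
    rw [hA, pvSumA_eq, pvSumB_zero, ← h]
    simp only [pvT, List.map_map, zero_add]
    exact congrArg List.sum (List.map_congr_left fun p _ => by simp [Function.comp])
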